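-- pv_equiv track=rewrite | github.com/reddynirup/prefsprograms | day32/program1.py | solve
-- ===== SOURCE A (Python) =====
-- def solve(c,lock):
--     res=[0]*len(lock)
--     for i in range(len(lock)):
--         if c>0:
--             for j in range(c):
--                 res[i]+=lock[(i+j+1)%len(lock)]
--         elif c<0:
--             for j in range(abs(c)):
--                 res[i]+=lock[(i-j-1)%len(lock)]
--     return res
-- ===== SOURCE B (Python) =====
-- def solve(c, lock):
--     n = len(lock)
--     if n == 0 or c == 0:
--         return [0] * n
--     pre = [0]
--     s = 0
--     for x in lock:
--         s += x
--         pre.append(s)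
--     total = pre[n]
--     m = abs(c)
--     q, r = divmod(m, n)
--     res = []
--     for i in range(n):
--         start = (i + 1) % n if c > 0 else (i + n - r) % n
--         if start + r <= n:
--             w = pre[start + r] - pre[start]
--         else:
--             w = (total - pre[start]) + pre[start + r - n]
--         res.append(q * total + w)
--     return res
-- ===== Notes on version B (the rewrite author's own statement) =====
-- stated objective: faster
-- what changed: Replaces the per-index O(|c|) inner accumulation loop with one prefix-sum array plus a divmod-based closed form (full-cycle multiples of the total plus one cyclic window read off the prefix sums), making the whole function O(n).
import Mathlib
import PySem

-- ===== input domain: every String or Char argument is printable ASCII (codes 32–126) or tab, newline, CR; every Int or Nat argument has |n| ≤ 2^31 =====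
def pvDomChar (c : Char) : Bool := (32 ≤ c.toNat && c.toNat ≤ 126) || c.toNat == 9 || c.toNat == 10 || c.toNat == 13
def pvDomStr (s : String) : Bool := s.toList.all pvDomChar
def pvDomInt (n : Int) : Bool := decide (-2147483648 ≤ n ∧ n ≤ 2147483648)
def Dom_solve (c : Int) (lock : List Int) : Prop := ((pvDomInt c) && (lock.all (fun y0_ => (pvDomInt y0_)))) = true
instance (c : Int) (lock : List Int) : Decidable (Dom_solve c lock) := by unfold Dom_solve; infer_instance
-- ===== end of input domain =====

-- B replaces A's per-index O(|c|) accumulation with prefix sums + divmod (O(n)); return value only, no mutation observable.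

-- ===== PORT A =====
-- literal port of A: res=[0]*n, then for each i, res[i] += lock[(i±j±1)%n] in an inner loop.
-- indices produced by `%` with positive n are in range, so lock[...] is read with getD (never hit out of range).
def solve (c : Int) (lock : List Int) : List Int :=
  (PySem.List.pyRange 0 lock.length 1).foldl
    (fun res i =>
      if c > 0 then
        res.set i.toNat ((res.getD i.toNat 0) +
          (PySem.List.pyRange 0 c 1).foldl
            (fun acc j => acc + PySem.List.pyGetD lock (PySem.Int.mod (i + j + 1) lock.length) 0) 0)
      else if c < 0 then
        res.set i.toNat ((res.getD i.toNat 0) +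
          (PySem.List.pyRange 0 |c| 1).foldl
            (fun acc j => acc + PySem.List.pyGetD lock (PySem.Int.mod (i - j - 1) lock.length) 0) 0)
      else res)
    (List.replicate lock.length 0)

-- ===== PORT B =====
-- port of Source B: prefix sums (scanl ports the running-sum loop), divmod, one cyclic window per index.
def solve_alt (c : Int) (lock : List Int) : List Int :=
  let n := lock.length
  if n = 0 ∨ c = 0 then List.replicate n 0
  else
    let pre := List.scanl (fun s x => s + x) 0 lock
    let total := pre.getD n 0
    let m := c.natAbs
    let q := m / n
    let r := m % n
    (List.range n).map (fun i =>
      let start := if c > 0 then (i + 1) % n else (i + n - r) % n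
      let w := if start + r ≤ n then pre.getD (start + r) 0 - pre.getD start 0
               else (total - pre.getD start 0) + pre.getD (start + r - n) 0
      (q : Int) * total + w)

-- ===== PRECONDITION & SPEC =====
def Spec_solve (c : Int) (lock : List Int) (out : List Int) : Prop := out = solve_alt c lock
instance (c : Int) (lock : List Int) (out : List Int) : Decidable (Spec_solve c lock out) := by unfold Spec_solve; infer_instance

-- ===== CLAIM (what is proved, stated in full; the proofs are below) =====
def Claim_equal_solve : Prop := ∀ (c : Int) (lock : List Int), Dom_solve c lock → Spec_solve c lock (solve c lock)

-- ===== LEMMAS AND PROOFS =====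

-- abbreviation used by the proofs: k-th element of lock (0 default), and prefix sums
def pvG (lock : List Int) (k : Nat) : Int := lock.getD k 0
def pvP (lock : List Int) (k : Nat) : Int := ∑ j ∈ Finset.range k, pvG lock j

theorem pv_foldl_add_range (f : Nat → Int) (m : Nat) :
    ∀ init : Int, (List.range m).foldl (fun a k => a + f k) init = init + ∑ k ∈ Finset.range m, f k := by
  induction m with
  | zero => intro init; simp
  | succ m ih =>
      intro init
      rw [List.range_succ, List.foldl_append, ih, Finset.sum_range_succ]
      simp [add_assoc]

-- scanl of (+) gives prefix sums
theorem pv_scanl_getD (l : List Int) :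
    ∀ (s : Int) (k : Nat), k ≤ l.length →
      (List.scanl (fun a x => a + x) s l).getD k 0 = s + (l.take k).sum := by
  induction l with
  | nil =>
      intro s k hk
      have : k = 0 := by simpa using hk
      subst this; simp [List.scanl]
  | cons x t ih =>
      intro s k hk
      cases k with
      | zero => simp [List.scanl_cons]
      | succ k =>
          rw [List.scanl_cons, List.getD_cons_succ, List.take_succ_cons, List.sum_cons,
            ih (s + x) k (by simpa using hk)]
          ring

theorem pv_take_sum (l : List Int) : ∀ k : Nat, k ≤ l.length →
    (l.take k).sum = pvP l k := by
  induction l with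
  | nil =>
      intro k hk
      have : k = 0 := by simpa using hk
      subst this; simp [pvP]
  | cons x t ih =>
      intro k hk
      cases k with
      | zero => simp [pvP]
      | succ k =>
          have h := ih k (by simpa using hk)
          simp only [pvP, pvG] at h
          simp only [List.take_succ_cons, List.sum_cons, pvP, Finset.sum_range_succ',
            pvG, List.getD_cons_succ, List.getD_cons_zero]
          rw [h]; ring

-- rotation invariance of a full cyclic sum
theorem pv_rot (lock : List Int) (n : Nat) (hn : lock.length = n) (hpos : 0 < n) :
    ∀ a : Nat, ∑ j ∈ Finset.range n, pvG lock ((a + j) % n) = pvP lock n := by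
  intro a
  induction a with
  | zero =>
      unfold pvP
      refine Finset.sum_congr rfl (fun j hj => ?_)
      rw [Finset.mem_range] at hj
      simp [Nat.mod_eq_of_lt hj]
  | succ a ih =>
      obtain ⟨k, rfl⟩ : ∃ k, n = k + 1 := ⟨n - 1, by omega⟩
      rw [← ih]
      have h1 : (a + 1 + k) % (k + 1) = a % (k + 1) := by
        have : a + 1 + k = a + (k + 1) := by omega
        rw [this, Nat.add_mod_right]
      have L : ∑ j ∈ Finset.range (k + 1), pvG lock ((a + 1 + j) % (k + 1))
          = (∑ j ∈ Finset.range k, pvG lock ((a + 1 + j) % (k + 1))) + pvG lock (a % (k + 1)) := by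
        rw [Finset.sum_range_succ, h1]
      have R : ∑ j ∈ Finset.range (k + 1), pvG lock ((a + j) % (k + 1))
          = (∑ j ∈ Finset.range k, pvG lock ((a + 1 + j) % (k + 1))) + pvG lock ((a + 0) % (k + 1)) := by
        rw [Finset.sum_range_succ']
        congr 1
        refine Finset.sum_congr rfl (fun j _ => ?_)
        congr 2
        omega
      rw [L, R]; norm_num

-- periodic-sum decomposition
theorem pv_per (n : Nat) (hpos : 0 < n) (f : Nat → Int) (hf : ∀ j, f (j + n) = f j) :
    ∀ m : Nat, ∑ j ∈ Finset.range m, f j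
      = ((m / n : Nat) : Int) * (∑ j ∈ Finset.range n, f j) + ∑ j ∈ Finset.range (m % n), f j := by
  intro m
  induction m using Nat.strong_induction_on with
  | _ m ih =>
      by_cases hm : m < n
      · rw [Nat.div_eq_of_lt hm, Nat.mod_eq_of_lt hm]; simp
      · push_neg at hm
        obtain ⟨m', rfl⟩ : ∃ m', m = n + m' := ⟨m - n, by omega⟩
        rw [Finset.sum_range_add]
        have hsh : ∀ j, f (n + j) = f j := fun j => by rw [Nat.add_comm, hf]
        simp only [hsh]
        rw [ih m' (by omega)]
        have hd : (n + m') / n = m' / n + 1 := by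
          rw [Nat.add_comm, Nat.add_div_right _ hpos]
        have hm2 : (n + m') % n = m' % n := Nat.add_mod_left n m'
        rw [hd, hm2]
        push_cast
        ring

-- cyclic window of length r < n starting at s < n read off the prefix sums
def pvWin (lock : List Int) (n s r : Nat) : Int :=
  if s + r ≤ n then pvP lock (s + r) - pvP lock s
  else (pvP lock n - pvP lock s) + pvP lock (s + r - n)

theorem pv_win (lock : List Int) (n : Nat) (s r : Nat)
    (hs : s < n) (hr : r < n) :
    ∑ j ∈ Finset.range r, pvG lock ((s + j) % n) = pvWin lock n s r := by
  unfold pvWin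
  by_cases h : s + r ≤ n
  · rw [if_pos h]
    have : ∑ j ∈ Finset.range r, pvG lock ((s + j) % n)
         = ∑ j ∈ Finset.range r, pvG lock (s + j) := by
      refine Finset.sum_congr rfl (fun j hj => ?_)
      rw [Finset.mem_range] at hj
      rw [Nat.mod_eq_of_lt (by omega)]
    rw [this]
    have h2 := Finset.sum_range_add (fun j => pvG lock j) s r
    unfold pvP
    rw [h2]; ring
  · rw [if_neg h]
    push_neg at h
    obtain ⟨r2, hr2⟩ : ∃ r2, r = (n - s) + r2 := ⟨r - (n - s), by omega⟩
    subst hr2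
    rw [Finset.sum_range_add]
    have e1 : ∑ j ∈ Finset.range (n - s), pvG lock ((s + j) % n)
            = pvP lock n - pvP lock s := by
      have : ∑ j ∈ Finset.range (n - s), pvG lock ((s + j) % n)
           = ∑ j ∈ Finset.range (n - s), pvG lock (s + j) := by
        refine Finset.sum_congr rfl (fun j hj => ?_)
        rw [Finset.mem_range] at hj
        rw [Nat.mod_eq_of_lt (by omega)]
      rw [this]
      have h2 := Finset.sum_range_add (fun j => pvG lock j) s (n - s)
      have h3 : s + (n - s) = n := by omega
      rw [h3] at h2
      unfold pvP
      rw [h2]; ring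
    have e2 : ∑ j ∈ Finset.range r2, pvG lock ((s + (n - s + j)) % n)
            = pvP lock (s + (n - s + r2) - n) := by
      have hx : ∀ j ∈ Finset.range r2, pvG lock ((s + (n - s + j)) % n) = pvG lock j := by
        intro j hj
        rw [Finset.mem_range] at hj
        have : s + (n - s + j) = j + n := by omega
        rw [this, Nat.add_mod_right, Nat.mod_eq_of_lt (by omega)]
      rw [Finset.sum_congr rfl hx]
      have : s + (n - s + r2) - n = r2 := by omega
      rw [this]
      rfl
    rw [e1, e2]


theorem pv_getD_set_self (l : List Int) (i : Nat) (v : Int) (h : i < l.length) :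
    (l.set i v).getD i 0 = v := by
  simp [List.getD_eq_getElem?_getD, h]

theorem pv_getD_set_ne (l : List Int) (i t : Nat) (v : Int) (h : i ≠ t) :
    (l.set i v).getD t 0 = l.getD t 0 := by
  simp [List.getD_eq_getElem?_getD, List.getElem?_set_ne h]

theorem pv_map_range_getD (r : List Int) :
    (List.range r.length).map (fun t => r.getD t 0) = r := by
  apply List.ext_getElem
  · simp
  · intro i h1 h2
    simp only [List.length_map, List.length_range] at h1
    simp [List.getD_eq_getElem?_getD, List.getElem?_eq_getElem h1]

-- the value A accumulates into res[i] (c ≠ 0)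
def pvV (c : Int) (lock : List Int) (i : Int) : Int :=
  if c > 0 then
    (PySem.List.pyRange 0 c 1).foldl
      (fun acc j => acc + PySem.List.pyGetD lock (PySem.Int.mod (i + j + 1) lock.length) 0) 0
  else
    (PySem.List.pyRange 0 |c| 1).foldl
      (fun acc j => acc + PySem.List.pyGetD lock (PySem.Int.mod (i - j - 1) lock.length) 0) 0

-- A's outer loop: fold of "set index i" over range, characterised as a map
theorem pv_foldl_set (n : Nat) (V : Int → Int) :
    ∀ (k a : Nat) (r : List Int), a + k = n → r.length = n →
      (PySem.List.pyRange (a : Int) (n : Int) 1).foldl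
        (fun res i => res.set i.toNat (res.getD i.toNat 0 + V i)) r
      = (List.range n).map (fun t => if a ≤ t then r.getD t 0 + V (t : Int) else r.getD t 0) := by
  intro k
  induction k with
  | zero =>
      intro a r ha hr
      have hae : a = n := by omega
      subst hae
      rw [PySem.List.pyRange_one_eq_nil (le_refl _)]
      simp only [List.foldl_nil]
      have h2 : (List.range a).map (fun t => if a ≤ t then r.getD t 0 + V (t : Int) else r.getD t 0)
          = (List.range a).map (fun t => r.getD t 0) := by
        refine List.map_congr_left (fun t ht => ?_)
        rw [List.mem_range] at ht
        rw [if_neg (by omega)]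
      rw [h2, ← hr, pv_map_range_getD]
  | succ k ih =>
      intro a r ha hr
      have halt : (a : Int) < (n : Int) := by exact_mod_cast (by omega : a < n)
      rw [PySem.List.pyRange_one_cons halt]
      simp only [List.foldl_cons, Int.toNat_natCast]
      have h1 : ((a : Int) + 1) = (((a + 1 : Nat)) : Int) := by push_cast; ring
      rw [h1, ih (a + 1) _ (by omega) (by simpa using hr)]
      refine List.map_congr_left (fun t ht => ?_)
      rw [List.mem_range] at ht
      by_cases h2 : t < a
      · rw [if_neg (by omega), if_neg (by omega), pv_getD_set_ne _ _ _ _ (by omega)]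
      · by_cases h3 : t = a
        · subst h3
          rw [if_neg (by omega), if_pos (le_refl t), pv_getD_set_self _ _ _ (by omega)]
        · rw [if_pos (by omega), if_pos (by omega), pv_getD_set_ne _ _ _ _ (by omega)]

theorem pv_foldl_id (l : List Int) (r : List Int) :
    List.foldl (fun (res : List Int) (_ : Int) => res) r l = r := by
  induction l generalizing r with
  | nil => rfl
  | cons x t ih => exact ih r

-- per-element value, positive c
theorem pv_elt_pos (c : Int) (lock : List Int) (n : Nat) (hn : lock.length = n) (hpos : 0 < n)
    (hcp : 0 < c) (t : Nat) (ht : t < n) :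
    pvV c lock (t : Int)
      = ((c.natAbs / n : Nat) : Int) * pvP lock n + pvWin lock n ((t + 1) % n) (c.natAbs % n) := by
  have hnz : (n : Int) ≠ 0 := by exact_mod_cast Nat.pos_iff_ne_zero.mp hpos
  unfold pvV
  rw [if_pos hcp, PySem.List.pyRange_one, List.foldl_map,
    pv_foldl_add_range (fun k => PySem.List.pyGetD lock
      (PySem.Int.mod ((t : Int) + ((0 : Int) + (k : Int)) + 1) lock.length) 0) _ 0, zero_add]
  have hm : ((c - 0).toNat) = c.natAbs := by omega
  rw [hm]
  have hterm : ∀ k ∈ Finset.range c.natAbs,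
      PySem.List.pyGetD lock (PySem.Int.mod ((t : Int) + ((0 : Int) + (k : Int)) + 1) lock.length) 0
        = pvG lock ((t + 1 + k) % n) := by
    intro k _
    rw [hn, PySem.Int.mod_eq_emod_of_pos (by exact_mod_cast hpos)]
    have h1 : ((t : Int) + ((0 : Int) + (k : Int)) + 1) = ((t + 1 + k : Nat) : Int) := by
      push_cast; ring
    rw [h1, ← Int.natCast_mod, PySem.List.pyGetD_natCast]
    rfl
  rw [Finset.sum_congr rfl hterm]
  have hf : ∀ k, pvG lock ((t + 1 + (k + n)) % n) = pvG lock ((t + 1 + k) % n) := by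
    intro k
    have : t + 1 + (k + n) = (t + 1 + k) + n := by omega
    rw [this, Nat.add_mod_right]
  rw [pv_per n hpos (fun k => pvG lock ((t + 1 + k) % n)) hf c.natAbs]
  rw [pv_rot lock n hn hpos (t + 1)]
  have hrem : ∀ k ∈ Finset.range (c.natAbs % n),
      pvG lock ((t + 1 + k) % n) = pvG lock (((t + 1) % n + k) % n) := by
    intro k _
    rw [Nat.mod_add_mod]
  rw [Finset.sum_congr rfl hrem,
    pv_win lock n ((t + 1) % n) (c.natAbs % n) (Nat.mod_lt _ hpos) (Nat.mod_lt _ hpos)]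

-- per-element value, negative c
theorem pv_elt_neg (c : Int) (lock : List Int) (n : Nat) (hn : lock.length = n) (hpos : 0 < n)
    (hcn : c < 0) (t : Nat) (ht : t < n) :
    pvV c lock (t : Int)
      = ((c.natAbs / n : Nat) : Int) * pvP lock n
        + pvWin lock n ((t + n - c.natAbs % n) % n) (c.natAbs % n) := by
  have hnz : (n : Int) ≠ 0 := by exact_mod_cast Nat.pos_iff_ne_zero.mp hpos
  unfold pvV
  rw [if_neg (by omega), PySem.List.pyRange_one, List.foldl_map,
    pv_foldl_add_range (fun k => PySem.List.pyGetD lock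
      (PySem.Int.mod ((t : Int) - ((0 : Int) + (k : Int)) - 1) lock.length) 0) _ 0, zero_add]
  have hm : ((|c| - 0).toNat) = c.natAbs := by rw [Int.abs_eq_natAbs]; omega
  rw [hm]
  have hterm : ∀ k ∈ Finset.range c.natAbs,
      PySem.List.pyGetD lock (PySem.Int.mod ((t : Int) - ((0 : Int) + (k : Int)) - 1) lock.length) 0
        = pvG lock ((((t : Int) - (k : Int) - 1) % (n : Int)).toNat) := by
    intro k _
    rw [hn, PySem.Int.mod_eq_emod_of_pos (by exact_mod_cast hpos)]
    have h1 : ((t : Int) - ((0 : Int) + (k : Int)) - 1) = (t : Int) - (k : Int) - 1 := by ring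
    rw [h1, PySem.List.pyGetD_of_nonneg lock 0 (Int.emod_nonneg _ hnz)]
    rfl
  rw [Finset.sum_congr rfl hterm]
  have hf : ∀ k, pvG lock ((((t : Int) - ((k + n : Nat) : Int) - 1) % (n : Int)).toNat)
      = pvG lock ((((t : Int) - (k : Int) - 1) % (n : Int)).toNat) := by
    intro k
    have h2 : ((t : Int) - ((k + n : Nat) : Int) - 1) = ((t : Int) - (k : Int) - 1) - (n : Int) := by
      push_cast; ring
    rw [h2, Int.sub_emod_right]
  rw [pv_per n hpos (fun k => pvG lock ((((t : Int) - (k : Int) - 1) % (n : Int)).toNat)) hf c.natAbs]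
  have hS : ∑ j ∈ Finset.range n, pvG lock ((((t : Int) - (j : Int) - 1) % (n : Int)).toNat)
      = pvP lock n := by
    rw [← Finset.sum_range_reflect
      (fun j => pvG lock ((((t : Int) - (j : Int) - 1) % (n : Int)).toNat)) n]
    have h3 : ∀ j ∈ Finset.range n,
        pvG lock ((((t : Int) - ((n - 1 - j : Nat) : Int) - 1) % (n : Int)).toNat)
          = pvG lock ((t + j) % n) := by
      intro j hj
      rw [Finset.mem_range] at hj
      have h4 : ((t : Int) - ((n - 1 - j : Nat) : Int) - 1) = ((t + j : Nat) : Int) - (n : Int) := by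
        omega
      rw [h4, Int.sub_emod_right, ← Int.natCast_mod, Int.toNat_natCast]
    rw [Finset.sum_congr rfl h3, pv_rot lock n hn hpos t]
  rw [hS]
  have hr : c.natAbs % n < n := Nat.mod_lt _ hpos
  have hrem : ∑ k ∈ Finset.range (c.natAbs % n),
      pvG lock ((((t : Int) - (k : Int) - 1) % (n : Int)).toNat)
      = ∑ k ∈ Finset.range (c.natAbs % n), pvG lock (((t + n - c.natAbs % n) % n + k) % n) := by
    rw [← Finset.sum_range_reflect
      (fun k => pvG lock ((((t : Int) - (k : Int) - 1) % (n : Int)).toNat)) (c.natAbs % n)]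
    refine Finset.sum_congr rfl (fun k hk => ?_)
    rw [Finset.mem_range] at hk
    have h5 : ((t : Int) - ((c.natAbs % n - 1 - k : Nat) : Int) - 1)
        = ((t + n - c.natAbs % n + k : Nat) : Int) - (n : Int) := by
      omega
    rw [h5, Int.sub_emod_right, ← Int.natCast_mod, Int.toNat_natCast, Nat.mod_add_mod]
  rw [hrem, pv_win lock n ((t + n - c.natAbs % n) % n) (c.natAbs % n) (Nat.mod_lt _ hpos) hr]

-- prefix list read = pvP
theorem pv_pre_getD (lock : List Int) (k : Nat) (hk : k ≤ lock.length) :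
    (List.scanl (fun s x => s + x) 0 lock).getD k 0 = pvP lock k := by
  rw [pv_scanl_getD lock 0 k hk, pv_take_sum lock k hk, zero_add]

theorem pv_main (c : Int) (lock : List Int) : solve c lock = solve_alt c lock := by
  by_cases h0 : lock.length = 0
  · have hnil : lock = [] := List.eq_nil_of_length_eq_zero h0
    subst hnil
    simp [solve, solve_alt, PySem.List.pyRange_one_eq_nil (le_refl (0 : Int))]
  · have hpos : 0 < lock.length := Nat.pos_of_ne_zero h0
    by_cases hc : c = 0
    · subst hc
      unfold solve solve_alt
      rw [if_pos (Or.inr rfl)]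
      have hfun : (fun (res : List Int) (i : Int) =>
          if (0 : Int) > 0 then
            res.set i.toNat ((res.getD i.toNat 0) +
              (PySem.List.pyRange 0 (0 : Int) 1).foldl
                (fun acc j => acc + PySem.List.pyGetD lock (PySem.Int.mod (i + j + 1) lock.length) 0) 0)
          else if (0 : Int) < 0 then
            res.set i.toNat ((res.getD i.toNat 0) +
              (PySem.List.pyRange 0 |(0 : Int)| 1).foldl
                (fun acc j => acc + PySem.List.pyGetD lock (PySem.Int.mod (i - j - 1) lock.length) 0) 0)
          else res) = fun (res : List Int) (_ : Int) => res := by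
        funext res i
        norm_num
      rw [hfun, pv_foldl_id]
    · -- main case: n > 0, c ≠ 0
      have hfun : (fun (res : List Int) (i : Int) =>
          if c > 0 then
            res.set i.toNat ((res.getD i.toNat 0) +
              (PySem.List.pyRange 0 c 1).foldl
                (fun acc j => acc + PySem.List.pyGetD lock (PySem.Int.mod (i + j + 1) lock.length) 0) 0)
          else if c < 0 then
            res.set i.toNat ((res.getD i.toNat 0) +
              (PySem.List.pyRange 0 |c| 1).foldl
                (fun acc j => acc + PySem.List.pyGetD lock (PySem.Int.mod (i - j - 1) lock.length) 0) 0)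
          else res)
          = fun (res : List Int) (i : Int) => res.set i.toNat (res.getD i.toNat 0 + pvV c lock i) := by
        funext res i
        by_cases hcp : c > 0
        · rw [if_pos hcp]; unfold pvV; rw [if_pos hcp]
        · have hcn : c < 0 := by omega
          rw [if_neg hcp, if_pos hcn]; unfold pvV; rw [if_neg hcp]
      unfold solve
      rw [hfun]
      have hset := pv_foldl_set lock.length (pvV c lock) lock.length 0
        (List.replicate lock.length 0) (by omega) (by simp)
      simp only [Nat.cast_zero] at hset
      rw [hset]
      have halt : solve_alt c lock = (List.range lock.length).map (fun t =>
          ((c.natAbs / lock.length : Nat) : Int) * pvP lock lock.length +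
          pvWin lock lock.length
            (if c > 0 then (t + 1) % lock.length
             else (t + lock.length - c.natAbs % lock.length) % lock.length)
            (c.natAbs % lock.length)) := by
        simp only [solve_alt]
        rw [if_neg (by push_neg; exact ⟨h0, hc⟩)]
        refine List.map_congr_left (fun t ht => ?_)
        rw [List.mem_range] at ht
        have hr : c.natAbs % lock.length < lock.length := Nat.mod_lt _ hpos
        have hs : (if c > 0 then (t + 1) % lock.length
            else (t + lock.length - c.natAbs % lock.length) % lock.length) < lock.length := by
          split_ifs <;> exact Nat.mod_lt _ hpos
        generalize (if c > 0 then (t + 1) % lock.length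
            else (t + lock.length - c.natAbs % lock.length) % lock.length) = st at hs ⊢
        congr 1
        · rw [pv_pre_getD lock lock.length (le_refl _)]
        · unfold pvWin
          by_cases hw : st + c.natAbs % lock.length ≤ lock.length
          · rw [if_pos hw, if_pos hw, pv_pre_getD lock _ hw, pv_pre_getD lock _ (by omega)]
          · rw [if_neg hw, if_neg hw, pv_pre_getD lock lock.length (le_refl _),
              pv_pre_getD lock _ (by omega), pv_pre_getD lock _ (by omega)]
      rw [halt]
      refine List.map_congr_left (fun t ht => ?_)
      rw [List.mem_range] at ht
      rw [if_pos (Nat.zero_le t)]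
      have hrepl : (List.replicate lock.length (0 : Int)).getD t 0 = 0 :=
        List.getD_replicate 0 (by omega)
      rw [hrepl, zero_add]
      by_cases hcp : c > 0
      · rw [pv_elt_pos c lock lock.length rfl hpos hcp t ht, if_pos hcp]
      · have hcn : c < 0 := by omega
        rw [pv_elt_neg c lock lock.length rfl hpos hcn t ht, if_neg hcp]

-- ===== VERDICT (by name: the statement is the Claim_ definition above) =====
theorem solve_spec : Claim_equal_solve := by
  intro c lock _
  unfold Spec_solve
  exact pv_main c lock
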